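-- pv_equiv track=rewrite | github.com/Twinday/Tetris_v2.0 | static.py | try_search_neighbor
-- ===== SOURCE A (Python) =====
-- def try_search_neighbor(matrix, boolmatrix, i, j):
--     if boolmatrix[i][j] == True:
--         return boolmatrix
--     else:
--         boolmatrix[i][j] = True
--         neighbor = list()
--         if j < len(matrix[i]) - 1:
--             if matrix[i][j] == matrix[i][j+1] and j+1 < len(matrix[i]):#справа
--                 if boolmatrix[i][j+1] == False:
--                     neighbor.append((i, j+1))
--         if matrix[i][j] == matrix[i][j-1] and j-1 >= 0:#слева
--             if boolmatrix[i][j-1] == False: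
--                 neighbor.append((i, j-1))
--         if i < len(matrix) - 1:
--             if matrix[i][j] == matrix[i+1][j] and i+1 < len(matrix):#снизу
--                 if boolmatrix[i+1][j] == False:
--                     neighbor.append((i+1, j))
--         if matrix[i][j] == matrix[i-1][j] and i-1 >= 0:#сверху
--             if boolmatrix[i-1][j] == False:
--                 neighbor.append((i-1, j))
--         if len(neighbor) > 0:
--             for a in neighbor:
--                 boolmatrix = try_search_neighbor(matrix, boolmatrix, a[0], a[1])
--         return boolmatrix
-- ===== SOURCE B (Python) =====
-- def try_search_neighbor(matrix, boolmatrix, i, j):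
--     # Iterative flood fill with an explicit worklist instead of recursion.
--     # Like the original, it mutates boolmatrix in place and returns it.
--     stack = [(i, j)]
--     while stack:
--         r, c = stack.pop(0)
--         if boolmatrix[r][c]:
--             continue
--         boolmatrix[r][c] = True
--         row = matrix[r]
--         v = row[c]
--         nbrs = []
--         if c < len(row) - 1 and v == row[c + 1] and not boolmatrix[r][c + 1]:
--             nbrs.append((r, c + 1))
--         if c - 1 >= 0 and v == row[c - 1] and not boolmatrix[r][c - 1]:
--             nbrs.append((r, c - 1))
--         if r < len(matrix) - 1 and v == matrix[r + 1][c] and not boolmatrix[r + 1][c]: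
--             nbrs.append((r + 1, c))
--         if r - 1 >= 0 and v == matrix[r - 1][c] and not boolmatrix[r - 1][c]:
--             nbrs.append((r - 1, c))
--         stack = nbrs + stack
--     return boolmatrix
-- ===== Notes on version B (the rewrite author's own statement) =====
-- stated objective: alternative
-- what changed: Replaces A's self-recursive flood fill (recurse into each qualifying neighbor) with an iterative explicit-worklist loop that pops a cell, marks it and prepends its qualifying neighbors, with bounds checked before each read instead of A's pre-guard wraparound reads.
-- outside the precondition, e.g. on try_search_neighbor([[1]], [[True]], -2, 0): A raises IndexError, B raises IndexError
import Mathlib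
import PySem

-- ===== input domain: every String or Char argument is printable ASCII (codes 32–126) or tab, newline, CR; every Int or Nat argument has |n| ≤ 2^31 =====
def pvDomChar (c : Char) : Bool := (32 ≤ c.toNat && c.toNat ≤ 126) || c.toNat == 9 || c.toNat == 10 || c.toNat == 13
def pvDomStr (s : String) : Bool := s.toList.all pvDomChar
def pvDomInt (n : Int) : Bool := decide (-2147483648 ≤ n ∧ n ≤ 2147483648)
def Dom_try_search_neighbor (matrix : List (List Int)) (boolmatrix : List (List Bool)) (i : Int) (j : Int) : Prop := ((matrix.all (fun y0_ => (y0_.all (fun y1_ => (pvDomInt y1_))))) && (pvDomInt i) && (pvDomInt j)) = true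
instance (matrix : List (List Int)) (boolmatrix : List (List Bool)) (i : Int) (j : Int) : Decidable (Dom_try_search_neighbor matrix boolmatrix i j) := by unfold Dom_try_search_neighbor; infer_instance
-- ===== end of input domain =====

-- B replaces A's recursive flood fill by an explicit-worklist loop (objective: alternative decomposition;
-- both Pythons mutate boolmatrix in place — the equivalence proved here is about the returned matrix).

-- Shared primitive accessors for `matrix[i][j]` / `boolmatrix[i][j]` / `boolmatrix[i][j] = True`.
-- The defaults (`0`, `true`, no-op set) are only reached where the Python raises IndexError; Pre_ excludes those inputs.
def pvMGet (m : List (List Int)) (i j : Int) : Int :=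
  PySem.List.pyGetD (PySem.List.pyGetD m i ([] : List Int)) j 0

def pvBGet (bm : List (List Bool)) (i j : Int) : Bool :=
  PySem.List.pyGetD (PySem.List.pyGetD bm i ([] : List Bool)) j true

def pvSetTrue (bm : List (List Bool)) (i j : Int) : List (List Bool) :=
  PySem.List.pySetD bm i (PySem.List.pySetD (PySem.List.pyGetD bm i ([] : List Bool)) j true)

-- number of unmarked cells; used only as the fuel bound of the two loops below
def pvFalseCells (bm : List (List Bool)) : Nat := (bm.map (fun r => r.count false)).sum

-- ===== PORT A =====
-- A's four neighbour guards, in A's order (right, left, down, up), evaluated after the mark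
def neighborsA (m : List (List Int)) (bm : List (List Bool)) (i j : Int) : List (Int × Int) :=
  (if j < ((PySem.List.pyGetD m i ([] : List Int)).length : Int) - 1 then
     (if pvMGet m i j = pvMGet m i (j+1) ∧ j + 1 < ((PySem.List.pyGetD m i ([] : List Int)).length : Int) then
        (if pvBGet bm i (j+1) = false then [(i, j+1)] else []) else []) else [])
  ++ (if pvMGet m i j = pvMGet m i (j-1) ∧ j - 1 ≥ 0 then
        (if pvBGet bm i (j-1) = false then [(i, j-1)] else []) else [])
  ++ (if i < (m.length : Int) - 1 then
        (if pvMGet m i j = pvMGet m (i+1) j ∧ i + 1 < (m.length : Int) then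
           (if pvBGet bm (i+1) j = false then [(i+1, j)] else []) else []) else [])
  ++ (if pvMGet m i j = pvMGet m (i-1) j ∧ i - 1 ≥ 0 then
        (if pvBGet bm (i-1) j = false then [(i-1, j)] else []) else [])

-- A's recursion, with a fuel guard for termination: each recursion level first marks a
-- previously-False cell, so the depth never exceeds pvFalseCells bm and the guard is never hit.
def goA (fuel : Nat) (m : List (List Int)) (bm : List (List Bool)) (i j : Int) : List (List Bool) :=
  match fuel with
  | 0 => bm
  | f+1 =>
    if pvBGet bm i j then bm
    else
      let bm1 := pvSetTrue bm i j
      (neighborsA m bm1 i j).foldl (fun acc a => goA f m acc a.1 a.2) bm1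

def try_search_neighbor (matrix : List (List Int)) (boolmatrix : List (List Bool)) (i : Int) (j : Int) : List (List Bool) :=
  goA (pvFalseCells boolmatrix + 1) matrix boolmatrix i j

-- ===== PORT B =====
-- B's four neighbour guards (bounds checked before the read, no wraparound read, flat conjunctions)
def neighborsB (m : List (List Int)) (bm : List (List Bool)) (r c : Int) : List (Int × Int) :=
  let row := PySem.List.pyGetD m r ([] : List Int)
  let v := PySem.List.pyGetD row c 0
  (if c < (row.length : Int) - 1 ∧ v = PySem.List.pyGetD row (c+1) 0 ∧ pvBGet bm r (c+1) = false then [(r, c+1)] else [])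
  ++ (if c - 1 ≥ 0 ∧ v = PySem.List.pyGetD row (c-1) 0 ∧ pvBGet bm r (c-1) = false then [(r, c-1)] else [])
  ++ (if r < (m.length : Int) - 1 ∧ v = pvMGet m (r+1) c ∧ pvBGet bm (r+1) c = false then [(r+1, c)] else [])
  ++ (if r - 1 ≥ 0 ∧ v = pvMGet m (r-1) c ∧ pvBGet bm (r-1) c = false then [(r-1, c)] else [])

-- B's while-loop over the worklist, one fuel unit per popped entry: at most one initial entry
-- plus four pushes per marked cell, so 4 * pvFalseCells bm + 2 fuel is never exhausted.
def loopB (fuel : Nat) (m : List (List Int)) (bm : List (List Bool)) (stack : List (Int × Int)) : List (List Bool) :=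
  match fuel, stack with
  | 0, _ => bm
  | _+1, [] => bm
  | f+1, (r, c) :: S =>
    if pvBGet bm r c then loopB f m bm S
    else
      let bm1 := pvSetTrue bm r c
      loopB f m bm1 (neighborsB m bm1 r c ++ S)

def try_search_neighbor_alt (matrix : List (List Int)) (boolmatrix : List (List Bool)) (i : Int) (j : Int) : List (List Bool) :=
  loopB (4 * pvFalseCells boolmatrix + 2) matrix boolmatrix [(i, j)]

-- ===== PRECONDITION & SPEC =====
-- Pre_ excludes jagged or shape-mismatched matrices and out-of-range / boundary negative indices,
-- on which A's unguarded wraparound reads generally raise IndexError (some such inputs happen to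
-- return when no read goes out of range; B behaves the same on the cited one). It admits every
-- rectangular matched-shape input with indices in the open range (exclusive of -len itself), and,
-- whatever the shapes, any input whose start cell is already marked (A returns it unchanged).
def Pre_try_search_neighbor (matrix : List (List Int)) (boolmatrix : List (List Bool)) (i : Int) (j : Int) : Prop :=
  (boolmatrix.length = matrix.length ∧
   (∀ r ∈ matrix, r.length = (matrix.headD ([] : List Int)).length) ∧
   (∀ r ∈ boolmatrix, r.length = (matrix.headD ([] : List Int)).length) ∧
   -(matrix.length : Int) < i ∧ i < (matrix.length : Int) ∧
   -((matrix.headD ([] : List Int)).length : Int) < j ∧ j < ((matrix.headD ([] : List Int)).length : Int))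
  ∨ PySem.List.pyGet? (PySem.List.pyGetD boolmatrix i ([] : List Bool)) j = some true
instance (matrix : List (List Int)) (boolmatrix : List (List Bool)) (i : Int) (j : Int) : Decidable (Pre_try_search_neighbor matrix boolmatrix i j) := by unfold Pre_try_search_neighbor; infer_instance

def pvWitness_try_search_neighbor : List (List Int) × List (List Bool) × Int × Int :=
  ([[1, 1], [2, 1]], [[false, false], [false, true]], 0, 0)

def Spec_try_search_neighbor (matrix : List (List Int)) (boolmatrix : List (List Bool)) (i : Int) (j : Int) (out : List (List Bool)) : Prop := out = try_search_neighbor_alt matrix boolmatrix i j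
instance (matrix : List (List Int)) (boolmatrix : List (List Bool)) (i : Int) (j : Int) (out : List (List Bool)) : Decidable (Spec_try_search_neighbor matrix boolmatrix i j out) := by unfold Spec_try_search_neighbor; infer_instance

-- ===== CLAIM (what is proved, stated in full; the proofs are below) =====
def Claim_equal_try_search_neighbor : Prop := ∀ (matrix : List (List Int)) (boolmatrix : List (List Bool)) (i : Int) (j : Int), Dom_try_search_neighbor matrix boolmatrix i j → Pre_try_search_neighbor matrix boolmatrix i j → Spec_try_search_neighbor matrix boolmatrix i j (try_search_neighbor matrix boolmatrix i j)

-- ===== LEMMAS AND PROOFS =====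

-- the two neighbour computations agree (A's redundant bound check and pre-guard wraparound
-- reads never change the resulting list)
theorem nbrs_eq (m : List (List Int)) (bm : List (List Bool)) (i j : Int) :
    neighborsA m bm i j = neighborsB m bm i j := by
  unfold neighborsA neighborsB pvMGet
  dsimp only
  congr 1
  congr 1
  congr 1
  · split_ifs <;> first | rfl | omega | tauto
  · split_ifs <;> first | rfl | omega | tauto
  · split_ifs <;> first | rfl | omega | tauto
  · split_ifs <;> first | rfl | omega | tauto

theorem nbrsB_len_le (m : List (List Int)) (bm : List (List Bool)) (r c : Int) :
    (neighborsB m bm r c).length ≤ 4 := by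
  unfold neighborsB
  dsimp only
  split_ifs <;> simp

-- marking an actually-unmarked cell strictly decreases the number of False cells
theorem pyIdx_lt {n : Nat} {i : Int} {k : Nat} (h : PySem.List.pyIdx? n i = some k) : k < n := by
  unfold PySem.List.pyIdx? at h
  split_ifs at h <;> simp_all <;> omega

theorem sum_set_nat (l : List Nat) (k : Nat) (a : Nat) (h : k < l.length) :
    (l.set k a).sum + l[k] = l.sum + a := by
  induction l generalizing k with
  | nil => simp at h
  | cons b l ih =>
    cases k with
    | zero => simp; omega
    | succ k =>
      simp only [List.set_cons_succ, List.sum_cons, List.getElem_cons_succ]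
      have := ih k (by simpa using h); omega

theorem cnt_set_lt (bm : List (List Bool)) (i j : Int) (h : pvBGet bm i j = false) :
    pvFalseCells (pvSetTrue bm i j) < pvFalseCells bm := by
  unfold pvBGet pvSetTrue at *
  unfold PySem.List.pyGetD PySem.List.pyGet? PySem.List.pySetD PySem.List.pySet? at *
  cases hki : PySem.List.pyIdx? bm.length i with
  | none => simp [hki] at h
  | some ki =>
    have hkilt : ki < bm.length := pyIdx_lt hki
    simp only [hki, Option.bind_some, List.getElem?_eq_getElem hkilt, Option.getD_some,
      Option.map_some] at h ⊢
    cases hkj : PySem.List.pyIdx? (bm[ki].length) j with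
    | none => simp [hkj] at h
    | some kj =>
      have hkjlt : kj < bm[ki].length := pyIdx_lt hkj
      simp only [hkj, Option.bind_some, List.getElem?_eq_getElem hkjlt, Option.getD_some,
        Option.map_some] at h ⊢
      unfold pvFalseCells
      rw [List.map_set]
      have hmlt : ki < (bm.map (fun r => r.count false)).length := by simpa using hkilt
      have hs := sum_set_nat (bm.map (fun r => r.count false)) ki
        ((bm[ki].set kj true).count false) hmlt
      have hg : (bm.map (fun r => r.count false))[ki] = bm[ki].count false := by simp
      have hm : (false : Bool) ∈ bm[ki] := h ▸ (bm[ki]).getElem_mem hkjlt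
      have hp : 0 < bm[ki].count false := List.count_pos_iff.mpr hm
      have hcnt : (bm[ki].set kj true).count false + 1 = bm[ki].count false := by
        simp [List.count_set, hkjlt, h]; omega
      omega

theorem cnt_goA_le (f : Nat) (m : List (List Int)) :
    ∀ (bm : List (List Bool)) (i j : Int), pvFalseCells (goA f m bm i j) ≤ pvFalseCells bm := by
  induction f with
  | zero => intro bm i j; simp [goA]
  | succ f ih =>
    intro bm i j
    simp only [goA]
    split
    · exact le_refl _
    · rename_i hb
      have key : ∀ (N : List (Int × Int)) (b : List (List Bool)),
          pvFalseCells (N.foldl (fun acc a => goA f m acc a.1 a.2) b) ≤ pvFalseCells b := by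
        intro N
        induction N with
        | nil => intro b; simp
        | cons a N ihN => intro b; exact le_trans (ihN _) (ih b a.1 a.2)
      exact le_trans (key _ _) (le_of_lt (cnt_set_lt bm i j (by simpa using hb)))

theorem cnt_goList_le (f : Nat) (m : List (List Int)) (N : List (Int × Int)) (bm : List (List Bool)) :
    pvFalseCells (N.foldl (fun acc a => goA f m acc a.1 a.2) bm) ≤ pvFalseCells bm := by
  induction N generalizing bm with
  | nil => simp
  | cons a N ih => exact le_trans (ih _) (cnt_goA_le f m bm a.1 a.2)

-- loopB is insensitive to its fuel once the fuel exceeds 4·(False cells) + stack length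
theorem loopB_irrel (f₁ : Nat) : ∀ (f₂ : Nat) (m : List (List Int)) (bm : List (List Bool)) (S : List (Int × Int)),
    4 * pvFalseCells bm + S.length < f₁ → 4 * pvFalseCells bm + S.length < f₂ →
    loopB f₁ m bm S = loopB f₂ m bm S := by
  induction f₁ with
  | zero => intro f₂ m bm S h1 h2; omega
  | succ f₁ ih =>
    intro f₂ m bm S h1 h2
    cases S with
    | nil => cases f₂ with
      | zero => omega
      | succ f₂ => simp [loopB]
    | cons a S =>
      obtain ⟨r, c⟩ := a
      cases f₂ with
      | zero => omega
      | succ f₂ =>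
        simp only [loopB]
        split
        · exact ih f₂ m bm S (by simp at h1 ⊢; omega) (by simp at h2 ⊢; omega)
        · rename_i hb
          have hlt := cnt_set_lt bm r c (by simpa using hb)
          have hlen := nbrsB_len_le m (pvSetTrue bm r c) r c
          apply ih
          · simp at h1 ⊢; omega
          · simp at h2 ⊢; omega

-- loopB with its canonical sufficient fuel
def pvLB (m : List (List Int)) (bm : List (List Bool)) (S : List (Int × Int)) : List (List Bool) :=
  loopB (4 * pvFalseCells bm + S.length + 1) m bm S

-- the simulation: running the worklist loop on N ++ S equals first running A's recursion on
-- every entry of N (with any sufficient fuel) and then the loop on S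
theorem loopB_nil (f : Nat) (m : List (List Int)) (bm : List (List Bool)) :
    loopB f m bm [] = bm := by
  cases f <;> simp [loopB]

theorem loopB_succ_cons (f : Nat) (m : List (List Int)) (bm : List (List Bool)) (r c : Int)
    (S : List (Int × Int)) :
    loopB (f+1) m bm ((r, c) :: S) =
      if pvBGet bm r c then loopB f m bm S
      else loopB f m (pvSetTrue bm r c) (neighborsB m (pvSetTrue bm r c) r c ++ S) := rfl

theorem pvLB_eq_loopB (f : Nat) (m : List (List Int)) (bm : List (List Bool))
    (S : List (Int × Int)) (h : 4 * pvFalseCells bm + S.length < f) :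
    loopB f m bm S = pvLB m bm S := by
  exact loopB_irrel f (4 * pvFalseCells bm + S.length + 1) m bm S h (by omega)

theorem sim : ∀ (n fA : Nat) (m : List (List Int)) (N : List (Int × Int)) (bm : List (List Bool)) (S : List (Int × Int)),
    pvFalseCells bm ≤ n → pvFalseCells bm < fA →
    pvLB m bm (N ++ S) = pvLB m (N.foldl (fun acc a => goA fA m acc a.1 a.2) bm) S := by
  intro n
  induction n using Nat.strong_induction_on with
  | _ n IH =>
  intro fA m N
  induction N with
  | nil => intro bm S _ _; simp
  | cons a N ihN =>
    obtain ⟨r, c⟩ := a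
    intro bm S hn hfa
    obtain ⟨f, rfl⟩ : ∃ f, fA = f + 1 := ⟨fA - 1, by omega⟩
    have hfuel : 4 * pvFalseCells bm + (((r, c) :: N) ++ S).length + 1
        = (4 * pvFalseCells bm + (N ++ S).length + 1) + 1 := by simp; omega
    by_cases hb : pvBGet bm r c = true
    · -- already marked: both sides skip the cell
      have hA : goA (f + 1) m bm r c = bm := by simp [goA, hb]
      calc pvLB m bm (((r, c) :: N) ++ S)
          = loopB ((4 * pvFalseCells bm + (N ++ S).length + 1) + 1) m bm ((r, c) :: (N ++ S)) := by
            rw [pvLB, hfuel]; rfl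
        _ = loopB (4 * pvFalseCells bm + (N ++ S).length + 1) m bm (N ++ S) := by
            rw [loopB_succ_cons, if_pos hb]
        _ = pvLB m bm (N ++ S) := rfl
        _ = pvLB m (N.foldl (fun acc a => goA (f+1) m acc a.1 a.2) bm) S := ihN bm S hn hfa
        _ = pvLB m ((((r, c) :: N)).foldl (fun acc a => goA (f+1) m acc a.1 a.2) bm) S := by
            simp only [List.foldl_cons, hA]
    · -- unmarked: mark it, then process its neighbours first
      have hbf : pvBGet bm r c = false := by simpa using hb
      set bm1 := pvSetTrue bm r c with hbm1
      have hc1 : pvFalseCells bm1 < pvFalseCells bm := cnt_set_lt bm r c hbf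
      have hlen := nbrsB_len_le m bm1 r c
      have hA : goA (f + 1) m bm r c
          = (neighborsA m bm1 r c).foldl (fun acc a => goA f m acc a.1 a.2) bm1 := by
        simp only [goA, hbf]; rfl
      set bm2 := (neighborsA m bm1 r c).foldl (fun acc a => goA f m acc a.1 a.2) bm1 with hbm2
      have hc2 : pvFalseCells bm2 ≤ pvFalseCells bm1 := cnt_goList_le f m _ bm1
      calc pvLB m bm (((r, c) :: N) ++ S)
          = loopB ((4 * pvFalseCells bm + (N ++ S).length + 1) + 1) m bm ((r, c) :: (N ++ S)) := by
            rw [pvLB, hfuel]; rfl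
        _ = loopB (4 * pvFalseCells bm + (N ++ S).length + 1) m bm1
              (neighborsB m bm1 r c ++ (N ++ S)) := by
            rw [loopB_succ_cons, if_neg hb]
        _ = pvLB m bm1 (neighborsA m bm1 r c ++ (N ++ S)) := by
            rw [nbrs_eq]
            exact pvLB_eq_loopB _ m bm1 _ (by simp at hlen ⊢; omega)
        _ = pvLB m bm2 (N ++ S) := by
            exact IH (pvFalseCells bm1) (by omega) f m (neighborsA m bm1 r c) bm1 (N ++ S)
              (le_refl _) (by omega)
        _ = pvLB m (N.foldl (fun acc a => goA (f+1) m acc a.1 a.2) bm2) S :=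
            ihN bm2 S (by omega) (by omega)
        _ = pvLB m ((((r, c) :: N)).foldl (fun acc a => goA (f+1) m acc a.1 a.2) bm) S := by
            simp only [List.foldl_cons, hA, hbm2]

-- ===== VERDICT (by name: the statement is the Claim_ definition above) =====
theorem try_search_neighbor_spec : Claim_equal_try_search_neighbor := by
  intro m bm i j _ _
  unfold Spec_try_search_neighbor try_search_neighbor try_search_neighbor_alt
  have h1 : loopB (4 * pvFalseCells bm + 2) m bm [(i, j)] = pvLB m bm ([(i, j)] ++ []) := by
    apply pvLB_eq_loopB
    simp
  have h2 := sim (pvFalseCells bm) (pvFalseCells bm + 1) m [(i, j)] bm []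
    (le_refl _) (Nat.lt_succ_self _)
  simp only [List.foldl] at h2
  rw [h1, h2, pvLB, loopB_nil]
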